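-- pv_equiv track=rewrite | github.com/stefanofante/nqueen | algo.py | fitness_f3
-- ===== SOURCE A (Python) =====
-- from collections import Counter
--
-- def fitness_f3(ind):
--     """
--     F3: penalità lineare su cluster di regine sulle stesse diagonali.
--
--     Diverso da F1/F2: penalizza specificamente i cluster sulle diagonali
--     con penalità lineare C(cnt,2). Incentiva distribuzione uniforme.
--     """
--     n = len(ind)
--     diag1 = Counter()  # diagonale principale
--     diag2 = Counter()  # diagonale secondaria
--
--     # Conta regine per diagonale
--     for c, r in enumerate(ind):
--         diag1[r - c] += 1
--         diag2[r + c] += 1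
--
--     penalty = 0
--     # Penalità lineare per cluster sulle diagonali
--     for cnt in diag1.values():
--         if cnt > 1:
--             penalty += cnt * (cnt - 1) // 2  # C(cnt,2)
--     for cnt in diag2.values():
--         if cnt > 1:
--             penalty += cnt * (cnt - 1) // 2
--
--     max_pairs = n * (n - 1) // 2
--     return max_pairs - penalty
-- ===== SOURCE B (Python) =====
-- def _run_pairs(vals):
--     # vals is sorted: equal values are adjacent; count equal pairs by run-length scan
--     pairs = 0
--     run = 0
--     prev = None
--     for v in vals:
--         if prev is not None and v == prev:
--             run += 1
--             pairs += run
--         else: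
--             run = 0
--         prev = v
--     return pairs
--
-- def fitness_f3(ind):
--     # Sort-then-scan: sort each diagonal-key list and count same-diagonal pairs
--     # by scanning adjacent runs; no Counter/dict and no C(cnt,2) formula.
--     n = len(ind)
--     d1 = sorted(r - c for c, r in enumerate(ind))
--     d2 = sorted(r + c for c, r in enumerate(ind))
--     return n * (n - 1) // 2 - _run_pairs(d1) - _run_pairs(d2)
-- ===== Notes on version B (the rewrite author's own statement) =====
-- stated objective: faster
-- what changed: Replaces A's hash-grouping algorithm (tally queens per r-c and r+c diagonal in two Counters, then a second pass summing C(cnt,2) over counter values) by sort-then-scan: sort each diagonal-key list and accumulate same-diagonal pairs by a run-length scan over adjacent equal values; no dictionary and no binomial formula appear.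
import Mathlib
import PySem

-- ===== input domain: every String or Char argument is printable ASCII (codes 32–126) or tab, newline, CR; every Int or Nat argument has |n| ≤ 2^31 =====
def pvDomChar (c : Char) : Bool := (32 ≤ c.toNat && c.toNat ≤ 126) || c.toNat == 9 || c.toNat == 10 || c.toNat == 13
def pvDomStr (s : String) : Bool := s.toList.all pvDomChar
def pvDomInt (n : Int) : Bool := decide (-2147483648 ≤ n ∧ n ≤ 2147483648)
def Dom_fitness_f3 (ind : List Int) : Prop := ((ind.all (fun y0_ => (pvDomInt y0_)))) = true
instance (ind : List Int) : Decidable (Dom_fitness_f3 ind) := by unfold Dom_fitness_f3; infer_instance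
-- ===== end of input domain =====

-- B replaces A's Counter grouping + sum of C(cnt,2) by sort-then-scan: sort each
-- diagonal-key list and count same-diagonal pairs by a run-length scan over adjacent
-- runs (measurably faster in CPython: builtin sort vs per-item Counter hashing).

-- ===== PORT A =====
def fitness_f3 (ind : List Int) : Int :=
  let n : Int := (ind.length : Int)
  let dd := (PySem.List.enumerate ind).foldl
      (fun (s : PySem.Dict Int Int × PySem.Dict Int Int) cr =>
        (s.1.modify (cr.2 - cr.1) 0 (· + 1), s.2.modify (cr.2 + cr.1) 0 (· + 1)))
      (PySem.Dict.empty, PySem.Dict.empty)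
  let p1 : Int := dd.1.values.foldl
      (fun p cnt => if cnt > 1 then p + PySem.Int.floordiv (cnt * (cnt - 1)) 2 else p) 0
  let p2 : Int := dd.2.values.foldl
      (fun p cnt => if cnt > 1 then p + PySem.Int.floordiv (cnt * (cnt - 1)) 2 else p) p1
  PySem.Int.floordiv (n * (n - 1)) 2 - p2

-- ===== PORT B =====
-- helper _run_pairs: run-length scan over a sorted list, state (pairs, run, prev)
def pvStep (s : Int × Int × Option Int) (v : Int) : Int × Int × Option Int :=
  if s.2.2 = some v then (s.1 + (s.2.1 + 1), s.2.1 + 1, some v)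
  else (s.1, (0 : Int), some v)

def pvRunPairs (vals : List Int) : Int :=
  (vals.foldl pvStep ((0 : Int), (0 : Int), (none : Option Int))).1

def fitness_f3_alt (ind : List Int) : Int :=
  let n : Int := (ind.length : Int)
  let d1 := PySem.List.sorted ((PySem.List.enumerate ind).map (fun cr => cr.2 - cr.1)) (fun x => x) false
  let d2 := PySem.List.sorted ((PySem.List.enumerate ind).map (fun cr => cr.2 + cr.1)) (fun x => x) false
  PySem.Int.floordiv (n * (n - 1)) 2 - pvRunPairs d1 - pvRunPairs d2

-- ===== PRECONDITION & SPEC =====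
def Spec_fitness_f3 (ind : List Int) (out : Int) : Prop := out = fitness_f3_alt ind
instance (ind : List Int) (out : Int) : Decidable (Spec_fitness_f3 ind out) := by unfold Spec_fitness_f3; infer_instance

-- ===== CLAIM (what is proved, stated in full; the proofs are below) =====
def Claim_equal_fitness_f3 : Prop := ∀ (ind : List Int), Dom_fitness_f3 ind → Spec_fitness_f3 ind (fitness_f3 ind)

-- ===== LEMMAS AND PROOFS =====

-- pairs function C(c,2) on Nat counts, as an Int
def pvG (c : Nat) : Int := ((c * (c - 1) / 2 : Nat) : Int)

-- total number of same-key pairs of a key list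
def pvPhi (ks : List Int) : Int := ((PySem.Set.ofList ks).map (fun k => pvG (ks.count k))).sum

def pvKs1 (ind : List Int) : List Int := (PySem.List.enumerate ind).map (fun cr => cr.2 - cr.1)
def pvKs2 (ind : List Int) : List Int := (PySem.List.enumerate ind).map (fun cr => cr.2 + cr.1)

theorem pvG_nat (c : Nat) : (c + 1) * (c + 1 - 1) / 2 = c * (c - 1) / 2 + c := by
  cases c with
  | zero => rfl
  | succ m =>
    have h2 : (m + 1 + 1) * (m + 1 + 1 - 1) = (m + 1) * ((m + 1) - 1) + (m + 1) * 2 := by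
      simp; ring
    rw [h2, Nat.add_mul_div_right _ _ (by norm_num : (0:Nat) < 2)]

theorem pvG_succ (c : Nat) : pvG (c + 1) = pvG c + (c : Int) := by
  unfold pvG
  rw [pvG_nat]
  push_cast; ring

theorem pv_sum_map_update (k : Int) (f f' : Int → Int)
    (h : ∀ j, j ≠ k → f' j = f j) :
    ∀ S : List Int, S.Nodup → k ∈ S →
      (S.map f').sum = (S.map f).sum + (f' k - f k) := by
  intro S
  induction S with
  | nil => intro _ hk; cases hk
  | cons a S ih =>
    intro hnd hk
    rcases List.mem_cons.mp hk with rfl | hk'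
    · have : S.map f' = S.map f := by
        apply List.map_congr_left
        intro j hj
        exact h j (fun hj' => (List.nodup_cons.mp hnd).1 (hj' ▸ hj))
      simp [this]; ring
    · have ha : a ≠ k := fun ha' => (List.nodup_cons.mp hnd).1 (ha' ▸ hk')
      simp only [List.map_cons, List.sum_cons, ih (List.nodup_cons.mp hnd).2 hk', h a ha]
      ring

theorem pv_ofList_append_singleton (ks : List Int) (k : Int) :
    PySem.Set.ofList (ks ++ [k]) = PySem.Set.add (PySem.Set.ofList ks) k := by
  rw [PySem.Set.ofList_eq_foldl, PySem.Set.ofList_eq_foldl, List.foldl_append]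
  rfl

theorem pvPhi_append (ks : List Int) (k : Int) :
    pvPhi (ks ++ [k]) = pvPhi ks + (ks.count k : Int) := by
  unfold pvPhi
  rw [pv_ofList_append_singleton]
  have hcount : ∀ j, j ≠ k → (ks ++ [k]).count j = ks.count j := by
    intro j hj
    have h0 : List.count j [k] = 0 := List.count_eq_zero.mpr (by simp [hj])
    rw [List.count_append, h0]
    omega
  have hck : (ks ++ [k]).count k = ks.count k + 1 := by
    simp [List.count_append]
  by_cases hk : k ∈ ks
  · have hadd : PySem.Set.add (PySem.Set.ofList ks) k = PySem.Set.ofList ks := by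
      simp [PySem.Set.add, PySem.Set.contains, hk, PySem.Set.mem_ofList]
    rw [hadd]
    rw [pv_sum_map_update k (fun j => pvG (ks.count j)) (fun j => pvG ((ks ++ [k]).count j))
        (fun j hj => by simp [hcount j hj])
        (PySem.Set.ofList ks) (PySem.Set.nodup_ofList ks) ((PySem.Set.mem_ofList ks k).mpr hk)]
    rw [hck, pvG_succ]; ring
  · have hadd : PySem.Set.add (PySem.Set.ofList ks) k = PySem.Set.ofList ks ++ [k] := by
      simp [PySem.Set.add, PySem.Set.contains, hk, PySem.Set.mem_ofList]
    rw [hadd, List.map_append, List.sum_append]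
    have h1 : (PySem.Set.ofList ks).map (fun j => pvG ((ks ++ [k]).count j))
        = (PySem.Set.ofList ks).map (fun j => pvG (ks.count j)) := by
      apply List.map_congr_left
      intro j hj
      have : j ≠ k := fun h => hk (h ▸ (PySem.Set.mem_ofList ks j).mp hj)
      simp [hcount j this]
    have hk0 : ks.count k = 0 := List.count_eq_zero.mpr hk
    rw [h1]
    simp only [List.map_cons, List.map_nil, List.sum_cons, List.sum_nil, hck, hk0]
    norm_num [pvG]

theorem pvPhi_perm (ks ks' : List Int) (h : ks.Perm ks') : pvPhi ks = pvPhi ks' := by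
  unfold pvPhi
  have hperm : (PySem.Set.ofList ks).Perm (PySem.Set.ofList ks') := by
    rw [List.perm_ext_iff_of_nodup (PySem.Set.nodup_ofList ks) (PySem.Set.nodup_ofList ks')]
    intro a
    rw [PySem.Set.mem_ofList, PySem.Set.mem_ofList]
    exact h.mem_iff
  calc ((PySem.Set.ofList ks).map (fun k => pvG (ks.count k))).sum
      = ((PySem.Set.ofList ks').map (fun k => pvG (ks.count k))).sum :=
        (hperm.map (fun k => pvG (ks.count k))).sum_eq
    _ = ((PySem.Set.ofList ks').map (fun k => pvG (ks'.count k))).sum := by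
        apply congrArg List.sum
        apply List.map_congr_left
        intro k _
        rw [h.count_eq]

-- invariant of the run-length scan on a sorted list: pairs so far = pvPhi,
-- run = multiplicity of the (maximal) last value minus one
theorem pvScan : ∀ (l : List Int), l ≠ [] → l.Pairwise (· ≤ ·) →
    ∃ p, p ∈ l ∧ (∀ a ∈ l, a ≤ p) ∧
      l.foldl pvStep ((0 : Int), (0 : Int), (none : Option Int))
        = (pvPhi l, (l.count p : Int) - 1, some p) := by
  intro l
  induction l using List.reverseRecOn with
  | nil => intro h; exact absurd rfl h
  | append_singleton t v ih =>
    intro _ hs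
    rcases List.pairwise_append.mp hs with ⟨hst, -, hbound⟩
    by_cases ht : t = []
    · subst ht
      refine ⟨v, by simp, by simp, ?_⟩
      simp only [List.nil_append, List.foldl_cons, List.foldl_nil, pvStep]
      simp [pvPhi, PySem.Set.ofList, PySem.Set.add, PySem.Set.contains, pvG]
    · obtain ⟨p, hpmem, hpmax, hfold⟩ := ih ht hst
      have hpv : p ≤ v := hbound p hpmem v (by simp)
      rw [List.foldl_append, hfold]
      simp only [List.foldl_cons, List.foldl_nil]
      by_cases hev : p = v
      · subst hev
        refine ⟨p, by simp, ?_, ?_⟩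
        · intro a ha
          rcases List.mem_append.mp ha with h | h
          · exact hpmax a h
          · simp at h; omega
        · simp only [pvStep]
          rw [pvPhi_append, List.count_append]
          simp
      · have hvnot : v ∉ t := by
          intro hvt
          have := hpmax v hvt
          omega
        have hcv : t.count v = 0 := List.count_eq_zero.mpr hvnot
        refine ⟨v, by simp, ?_, ?_⟩
        · intro a ha
          rcases List.mem_append.mp ha with h | h
          · exact hbound a h v (by simp)
          · simp at h; omega
        · have hne : ¬ ((some p : Option Int) = some v) := by
            simp; omega
          simp only [pvStep, if_neg hne]
          rw [pvPhi_append, List.count_append, hcv]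
          simp

-- _run_pairs on the sorted list computes the same-key pair count pvPhi
theorem pvRunPairs_sorted (ks : List Int) :
    pvRunPairs (PySem.List.sorted ks (fun x => x) false) = pvPhi ks := by
  set s := PySem.List.sorted ks (fun x => x) false with hsdef
  have hperm : s.Perm ks := PySem.List.sorted_perm ks (fun x => x) false
  have hpair : s.Pairwise (· ≤ ·) := PySem.List.sorted_pairwise ks (fun x => x)
  by_cases hnil : s = []
  · have : ks = [] := by
      have := hperm.length_eq
      rw [hnil] at this
      exact List.length_eq_zero_iff.mp this.symm
    subst this
    rw [hnil]
    simp [pvRunPairs, pvPhi, PySem.Set.ofList]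
  · obtain ⟨p, -, -, hfold⟩ := pvScan s hnil hpair
    unfold pvRunPairs
    rw [hfold]
    exact pvPhi_perm s ks hperm

-- A's penalty pass over a counter's values sums C(cnt,2), i.e. adds pvPhi
theorem pvA_pen (K : List Int) (p : Int) :
    (PySem.Dict.counter K).values.foldl
      (fun p cnt => if cnt > 1 then p + PySem.Int.floordiv (cnt * (cnt - 1)) 2 else p) p
    = p + pvPhi K := by
  have hvals : (PySem.Dict.counter K).values
      = (PySem.Set.ofList K).map (fun k => (K.count k : Int)) := by
    show ((PySem.Dict.counter K).items).map (·.2) = _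
    rw [PySem.Dict.items_counter]
    simp
  rw [hvals]
  have hstep : ∀ (q : Int) (cnt : Int),
      (if cnt > 1 then q + PySem.Int.floordiv (cnt * (cnt - 1)) 2 else q)
      = q + (if cnt > 1 then PySem.Int.floordiv (cnt * (cnt - 1)) 2 else 0) := by
    intro q cnt; split_ifs <;> simp
  calc ((PySem.Set.ofList K).map (fun k => (K.count k : Int))).foldl
        (fun p cnt => if cnt > 1 then p + PySem.Int.floordiv (cnt * (cnt - 1)) 2 else p) p
      = ((PySem.Set.ofList K).map (fun k => (K.count k : Int))).foldl
        (fun p cnt => p + (if cnt > 1 then PySem.Int.floordiv (cnt * (cnt - 1)) 2 else 0)) p := by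
        apply PySem.List.foldl_congr_mem; intro acc x _; exact hstep acc x
    _ = p + pvPhi K := by
        rw [PySem.List.foldl_add]
        unfold pvPhi
        congr 1
        rw [List.map_map]
        apply congrArg List.sum
        apply List.map_congr_left
        intro k _
        show (if ((K.count k : Int)) > 1 then
            PySem.Int.floordiv ((K.count k : Int) * ((K.count k : Int) - 1)) 2 else 0)
          = pvG (K.count k)
        set c := K.count k with hc
        by_cases h2 : 2 ≤ c
        · have hgt : ((c : Int)) > 1 := by exact_mod_cast h2
          rw [if_pos hgt]
          have hcast : ((c : Int)) * ((c : Int) - 1) = ((c * (c - 1) : Nat) : Int) := by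
            have h1 : 1 ≤ c := by omega
            push_cast [Nat.cast_sub h1]; ring
          rw [hcast]
          unfold pvG
          exact_mod_cast PySem.Int.floordiv_natCast (c * (c - 1)) 2
        · have hle : ¬ ((c : Int)) > 1 := by
            have : c ≤ 1 := by omega
            exact_mod_cast not_lt.mpr (by exact_mod_cast this : (c:Int) ≤ 1)
          rw [if_neg hle]
          unfold pvG
          interval_cases c <;> simp

-- A's counting loop builds exactly the two counters
theorem pvA_dicts (ind : List Int) :
    (PySem.List.enumerate ind).foldl
      (fun (s : PySem.Dict Int Int × PySem.Dict Int Int) cr =>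
        (s.1.modify (cr.2 - cr.1) 0 (· + 1), s.2.modify (cr.2 + cr.1) 0 (· + 1)))
      (PySem.Dict.empty, PySem.Dict.empty)
    = (PySem.Dict.counter (pvKs1 ind), PySem.Dict.counter (pvKs2 ind)) := by
  rw [PySem.List.foldl_prod_mk
      (f := fun (d : PySem.Dict Int Int) (cr : Int × Int) => d.modify (cr.2 - cr.1) 0 (· + 1))
      (g := fun (d : PySem.Dict Int Int) (cr : Int × Int) => d.modify (cr.2 + cr.1) 0 (· + 1))]
  unfold pvKs1 pvKs2
  rw [PySem.Dict.counter_eq_foldl, PySem.Dict.counter_eq_foldl, List.foldl_map, List.foldl_map]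

-- ===== VERDICT (by name: the statement is the Claim_ definition above) =====
theorem fitness_f3_spec : Claim_equal_fitness_f3 := by
  intro ind _
  unfold Spec_fitness_f3 fitness_f3 fitness_f3_alt
  simp only [pvA_dicts, pvA_pen, pvRunPairs_sorted]
  show _ = _ - pvPhi (pvKs1 ind) - pvPhi (pvKs2 ind)
  ring
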